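-- pv_equiv track=rewrite | github.com/anichiti/openmrs_chatbot | openmrs_chatbot/agents/allergy_response.py | detect_asking_about_self
-- ===== SOURCE A (Python) =====
-- def detect_asking_about_self(user_question):
--     """
--     Detect if user is asking about themselves or about someone else (child, dependent)
--
--     Args:
--         user_question: Patient's question string
--
--     Returns:
--         Boolean: True if asking about self, False if asking about child/dependent
--     """
--     question_lower = user_question.lower()
--
--     # Child/family reference keywords (check these FIRST - they're more specific)
--     child_keywords = ['my child', 'my children', 'my kid', 'my kids', 'my baby',
--                      'my son', 'my daughter', 'my family', 'my dependent', 'they have',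
--                      'their ', 'our child', 'our children']
--
--     # Self-reference keywords (more general)
--     self_keywords = ['i have', 'do i', 'am i', 'will i', 'can i', 'do i have',
--                     'myself', 'i\'m allergic', 'i\'m', 'about me', 'about myself']
--
--     # Count child references (check for these first as they're more specific)
--     child_count = sum(1 for kw in child_keywords if kw in question_lower)
--
--     # Count self references
--     self_count = sum(1 for kw in self_keywords if kw in question_lower)
--
--     # If any child keywords found, assume asking about child
--     if child_count > 0:
--         return False
--
--     # If any self keywords found, assume asking about self
--     if self_count > 0:
--         return True
--
--     # Default: assume asking about self if unclear
--     return True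
-- ===== SOURCE B (Python) =====
-- # One left-to-right scan over the question with a first-character dispatch table:
-- # at each position we only try the child keywords whose first letter matches, via
-- # startswith-at-offset.  A instead runs a full substring search per keyword (over
-- # two lists with counts); both the self branch and the default return True, so the
-- # self list never affects the result.
--
-- _CHILD_KEYWORDS = ['my child', 'my children', 'my kid', 'my kids', 'my baby',
--                    'my son', 'my daughter', 'my family', 'my dependent', 'they have',
--                    'their ', 'our child', 'our children']
--
-- _DISPATCH = {}
-- for _kw in _CHILD_KEYWORDS:
--     _DISPATCH.setdefault(_kw[0], []).append(_kw)
--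
--
-- def detect_asking_about_self(user_question):
--     q = user_question.lower()
--     for i in range(len(q)):
--         for kw in _DISPATCH.get(q[i], ()):
--             if q.startswith(kw, i):
--                 return False
--     return True
-- ===== Notes on version B (the rewrite author's own statement) =====
-- stated objective: alternative
-- what changed: B replaces A's per-keyword substring searches and two counters with a single left-to-right scan over the question positions using a first-character dispatch table (dict from first letter to keywords) and startswith-at-offset, short-circuiting on the first hit; the self-keyword list is dropped because both the self branch and the default return True.
import Mathlib
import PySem

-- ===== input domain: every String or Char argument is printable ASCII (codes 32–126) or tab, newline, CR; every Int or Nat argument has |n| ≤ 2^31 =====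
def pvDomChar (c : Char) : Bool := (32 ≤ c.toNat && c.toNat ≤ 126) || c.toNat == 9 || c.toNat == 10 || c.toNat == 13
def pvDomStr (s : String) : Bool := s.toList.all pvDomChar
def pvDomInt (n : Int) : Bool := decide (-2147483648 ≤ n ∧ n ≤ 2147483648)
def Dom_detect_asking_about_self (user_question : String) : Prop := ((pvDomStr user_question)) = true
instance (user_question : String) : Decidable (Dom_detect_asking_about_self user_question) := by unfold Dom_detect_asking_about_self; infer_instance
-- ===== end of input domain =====

-- B: one left-to-right position scan with a first-character dispatch table and
-- startswith-at-offset, instead of A's per-keyword substring searches with two counters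
-- (the self list is dead: that branch and the default both return True).

-- ===== PORT A =====
def pvChildKeywords : List String :=
  ["my child", "my children", "my kid", "my kids", "my baby",
   "my son", "my daughter", "my family", "my dependent", "they have",
   "their ", "our child", "our children"]

def pvSelfKeywords : List String :=
  ["i have", "do i", "am i", "will i", "can i", "do i have",
   "myself", "i'm allergic", "i'm", "about me", "about myself"]

def detect_asking_about_self (user_question : String) : Bool :=
  let question_lower := PySem.Str.lower user_question
  let child_count : Nat :=
    pvChildKeywords.foldl (fun acc kw => if PySem.Str.isIn kw question_lower then acc + 1 else acc) 0
  let self_count : Nat :=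
    pvSelfKeywords.foldl (fun acc kw => if PySem.Str.isIn kw question_lower then acc + 1 else acc) 0
  if child_count > 0 then false
  else if self_count > 0 then true
  else true

-- ===== PORT B =====
-- Source B's module-level dict _DISPATCH maps a first letter to the child keywords starting
-- with it; its .get(c, ()) lookup is ported exactly as an if-chain over the dict's three
-- literal keys ('m', 't', 'o' — insertion order of the module loop).
def pvDispatch (c : Char) : List String :=
  if c = 'm' then
    ["my child", "my children", "my kid", "my kids", "my baby",
     "my son", "my daughter", "my family", "my dependent"]
  else if c = 't' then ["they have", "their "]
  else if c = 'o' then ["our child", "our children"]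
  else []

-- Source B's `for i in range(len(q))` loop with `q.startswith(kw, i)` as structural
-- recursion over the suffixes of q (position i ↔ suffix `c :: rest`).
def pvScan : List Char → Bool
  | [] => true
  | c :: rest =>
    if (pvDispatch c).any (fun kw => PySem.Chars.startswith (c :: rest) kw.toList) then false
    else pvScan rest

def detect_asking_about_self_alt (user_question : String) : Bool :=
  pvScan (PySem.Str.lower user_question).toList

-- ===== PRECONDITION & SPEC =====
def Spec_detect_asking_about_self (user_question : String) (out : Bool) : Prop := out = detect_asking_about_self_alt user_question
instance (user_question : String) (out : Bool) : Decidable (Spec_detect_asking_about_self user_question out) := by unfold Spec_detect_asking_about_self; infer_instance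

-- ===== CLAIM (what is proved, stated in full; the proofs are below) =====
def Claim_equal_detect_asking_about_self : Prop := ∀ (user_question : String), Dom_detect_asking_about_self user_question → Spec_detect_asking_about_self user_question (detect_asking_about_self user_question)

-- ===== LEMMAS AND PROOFS =====

-- a counting fold is positive iff some element satisfies the predicate
theorem pv_foldl_count_pos {α : Type} (p : α → Bool) (l : List α) (acc : Nat) :
    (0 < l.foldl (fun a kw => if p kw then a + 1 else a) acc) ↔ (0 < acc ∨ l.any p) := by
  induction l generalizing acc with
  | nil => simp
  | cons x xs ih =>
    simp only [List.foldl_cons, List.any_cons, ih]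
    by_cases h : p x = true <;> simp [h]

-- startswith fails when the keyword's first character differs from the position's character
theorem pv_sw_false (c : Char) (rest : List Char) (kw : String) (h0 : Char) (tl : List Char)
    (hkw : kw.toList = h0 :: tl) (hne : h0 ≠ c) :
    PySem.Chars.startswith (c :: rest) kw.toList = false := by
  rw [hkw, Bool.eq_false_iff]
  intro hsw
  rw [PySem.Chars.startswith_iff] at hsw
  exact hne (List.cons_prefix_cons.mp hsw).1

-- the dispatch table is complete: at any position it tries exactly the keywords that could match
theorem pv_dispatch_complete (c : Char) (rest : List Char) :
    ((pvDispatch c).any (fun kw => PySem.Chars.startswith (c :: rest) kw.toList))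
      = (pvChildKeywords.any (fun kw => PySem.Chars.startswith (c :: rest) kw.toList)) := by
  by_cases hm : c = 'm'
  · subst hm
    simp only [pvDispatch, pvChildKeywords, if_pos rfl, List.any_cons, List.any_nil]
    rw [pv_sw_false 'm' rest "they have" 't' "hey have".toList (by decide) (by decide),
        pv_sw_false 'm' rest "their " 't' "heir ".toList (by decide) (by decide),
        pv_sw_false 'm' rest "our child" 'o' "ur child".toList (by decide) (by decide),
        pv_sw_false 'm' rest "our children" 'o' "ur children".toList (by decide) (by decide)]
    simp [Bool.or_assoc]
  · by_cases ht : c = 't'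
    · subst ht
      simp only [pvDispatch, pvChildKeywords, if_neg (by decide : ¬ ('t' = 'm')), if_pos rfl,
        List.any_cons, List.any_nil]
      rw [pv_sw_false 't' rest "my child" 'm' "y child".toList (by decide) (by decide),
          pv_sw_false 't' rest "my children" 'm' "y children".toList (by decide) (by decide),
          pv_sw_false 't' rest "my kid" 'm' "y kid".toList (by decide) (by decide),
          pv_sw_false 't' rest "my kids" 'm' "y kids".toList (by decide) (by decide),
          pv_sw_false 't' rest "my baby" 'm' "y baby".toList (by decide) (by decide),
          pv_sw_false 't' rest "my son" 'm' "y son".toList (by decide) (by decide),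
          pv_sw_false 't' rest "my daughter" 'm' "y daughter".toList (by decide) (by decide),
          pv_sw_false 't' rest "my family" 'm' "y family".toList (by decide) (by decide),
          pv_sw_false 't' rest "my dependent" 'm' "y dependent".toList (by decide) (by decide),
          pv_sw_false 't' rest "our child" 'o' "ur child".toList (by decide) (by decide),
          pv_sw_false 't' rest "our children" 'o' "ur children".toList (by decide) (by decide)]
      simp [Bool.or_assoc]
    · by_cases ho : c = 'o'
      · subst ho
        simp only [pvDispatch, pvChildKeywords, if_neg (by decide : ¬ ('o' = 'm')),
          if_neg (by decide : ¬ ('o' = 't')), if_pos rfl, List.any_cons, List.any_nil]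
        rw [pv_sw_false 'o' rest "my child" 'm' "y child".toList (by decide) (by decide),
            pv_sw_false 'o' rest "my children" 'm' "y children".toList (by decide) (by decide),
            pv_sw_false 'o' rest "my kid" 'm' "y kid".toList (by decide) (by decide),
            pv_sw_false 'o' rest "my kids" 'm' "y kids".toList (by decide) (by decide),
            pv_sw_false 'o' rest "my baby" 'm' "y baby".toList (by decide) (by decide),
            pv_sw_false 'o' rest "my son" 'm' "y son".toList (by decide) (by decide),
            pv_sw_false 'o' rest "my daughter" 'm' "y daughter".toList (by decide) (by decide),
            pv_sw_false 'o' rest "my family" 'm' "y family".toList (by decide) (by decide),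
            pv_sw_false 'o' rest "my dependent" 'm' "y dependent".toList (by decide) (by decide),
            pv_sw_false 'o' rest "they have" 't' "hey have".toList (by decide) (by decide),
            pv_sw_false 'o' rest "their " 't' "heir ".toList (by decide) (by decide)]
        simp [Bool.or_assoc]
      · simp only [pvDispatch, if_neg hm, if_neg ht, if_neg ho, List.any_nil, pvChildKeywords,
          List.any_cons, List.any_nil]
        rw [pv_sw_false c rest "my child" 'm' "y child".toList (by decide) (Ne.symm hm),
            pv_sw_false c rest "my children" 'm' "y children".toList (by decide) (Ne.symm hm),
            pv_sw_false c rest "my kid" 'm' "y kid".toList (by decide) (Ne.symm hm),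
            pv_sw_false c rest "my kids" 'm' "y kids".toList (by decide) (Ne.symm hm),
            pv_sw_false c rest "my baby" 'm' "y baby".toList (by decide) (Ne.symm hm),
            pv_sw_false c rest "my son" 'm' "y son".toList (by decide) (Ne.symm hm),
            pv_sw_false c rest "my daughter" 'm' "y daughter".toList (by decide) (Ne.symm hm),
            pv_sw_false c rest "my family" 'm' "y family".toList (by decide) (Ne.symm hm),
            pv_sw_false c rest "my dependent" 'm' "y dependent".toList (by decide) (Ne.symm hm),
            pv_sw_false c rest "they have" 't' "hey have".toList (by decide) (Ne.symm ht),
            pv_sw_false c rest "their " 't' "heir ".toList (by decide) (Ne.symm ht),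
            pv_sw_false c rest "our child" 'o' "ur child".toList (by decide) (Ne.symm ho),
            pv_sw_false c rest "our children" 'o' "ur children".toList (by decide) (Ne.symm ho)]
        simp

-- substring containment unfolds one position: match here, or somewhere in the tail
theorem pv_isIn_cons (kw : List Char) (c : Char) (rest : List Char) :
    PySem.Chars.isIn kw (c :: rest)
      = (PySem.Chars.startswith (c :: rest) kw || PySem.Chars.isIn kw rest) := by
  rw [Bool.eq_iff_iff]
  simp [PySem.Chars.isIn_iff_infix, PySem.Chars.startswith_iff, List.infix_cons_iff]

-- any distributes over a pointwise disjunction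
theorem pv_any_or {α : Type} (p q : α → Bool) (l : List α) :
    (l.any fun x => p x || q x) = (l.any p || l.any q) := by
  induction l with
  | nil => simp
  | cons x xs ih =>
    simp only [List.any_cons, ih]
    cases p x <;> cases q x <;> simp

-- the position scan computes the negation of "some child keyword occurs"
theorem pv_scan_eq (cs : List Char) :
    pvScan cs = !(pvChildKeywords.any (fun kw => PySem.Chars.isIn kw.toList cs)) := by
  induction cs with
  | nil => decide
  | cons c rest ih =>
    rw [pvScan, pv_dispatch_complete]
    have hsplit : (pvChildKeywords.any (fun kw => PySem.Chars.isIn kw.toList (c :: rest)))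
        = ((pvChildKeywords.any (fun kw => PySem.Chars.startswith (c :: rest) kw.toList))
           || (pvChildKeywords.any (fun kw => PySem.Chars.isIn kw.toList rest))) := by
      simp only [pv_isIn_cons]
      exact pv_any_or _ _ _
    rw [hsplit]
    by_cases h : (pvChildKeywords.any (fun kw => PySem.Chars.startswith (c :: rest) kw.toList)) = true
    · rw [if_pos h, h]; simp
    · rw [if_neg h, ih, Bool.eq_false_iff.mpr h]; simp

-- ===== VERDICT (by name: the statement is the Claim_ definition above) =====
theorem detect_asking_about_self_spec : Claim_equal_detect_asking_about_self := by
  intro q _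
  unfold Spec_detect_asking_about_self detect_asking_about_self detect_asking_about_self_alt
  rw [pv_scan_eq]
  by_cases h : (pvChildKeywords.any (fun kw => PySem.Chars.isIn kw.toList (PySem.Str.lower q).toList)) = true
  · have hc : 0 < pvChildKeywords.foldl
        (fun acc kw => if PySem.Str.isIn kw (PySem.Str.lower q) then acc + 1 else acc) 0 := by
      rw [pv_foldl_count_pos]
      refine Or.inr ?_
      simpa [PySem.Str.isIn_eq] using h
    rw [if_pos hc, h]
    rfl
  · have hc : ¬ 0 < pvChildKeywords.foldl
        (fun acc kw => if PySem.Str.isIn kw (PySem.Str.lower q) then acc + 1 else acc) 0 := by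
      rw [pv_foldl_count_pos]
      rintro (h0 | ha)
      · exact absurd h0 (by omega)
      · exact h (by simpa [PySem.Str.isIn_eq] using ha)
    rw [if_neg hc, ite_self, Bool.eq_false_iff.mpr h]
    rfl
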